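-- pv_equiv track=rewrite | github.com/maayanmatsliah-tech/HeavyBall | heavyball/chainable.py | _enforce_uniform_skip
-- ===== SOURCE A (Python) =====
-- def _enforce_uniform_skip(results):
--     skips = [skip for _, skip, _ in results]
--     if not skips:
--         return False
--     if all(skips):
--         return True
--     if not any(skips):
--         return False
--     raise ValueError("All branches must uniformly skip or not skip updates")
-- ===== SOURCE B (Python) =====
-- def _enforce_uniform_skip(results):
--     it = iter(results)
--     try:
--         _, first, _ = next(it)
--     except StopIteration:
--         return False
--     first = bool(first)
--     for _, skip, _ in it:
--         if bool(skip) != first: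
--             raise ValueError("All branches must uniformly skip or not skip updates")
--     return first
-- ===== Notes on version B (the rewrite author's own statement) =====
-- stated objective: alternative
-- what changed: Instead of A's collect-then-classify (build the full skips list, then empty/all()/any() passes), B takes the first element's flag as a reference and checks each remaining flag against it, raising on the first mismatch; the answer is simply the reference flag.
import Mathlib
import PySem

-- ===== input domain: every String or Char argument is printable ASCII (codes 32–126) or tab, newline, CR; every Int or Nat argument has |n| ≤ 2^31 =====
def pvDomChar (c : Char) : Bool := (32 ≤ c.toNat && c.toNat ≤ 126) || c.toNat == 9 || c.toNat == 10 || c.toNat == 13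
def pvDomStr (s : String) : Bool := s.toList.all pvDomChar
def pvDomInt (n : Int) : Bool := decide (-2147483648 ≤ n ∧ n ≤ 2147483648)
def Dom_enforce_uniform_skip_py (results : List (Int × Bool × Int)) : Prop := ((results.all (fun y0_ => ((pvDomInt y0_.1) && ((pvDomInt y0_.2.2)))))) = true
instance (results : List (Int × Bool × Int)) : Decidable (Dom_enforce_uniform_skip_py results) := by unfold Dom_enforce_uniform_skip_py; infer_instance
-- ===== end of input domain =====

-- B replaces A's collect-then-classify with a compare-to-first streaming check; equal on all uniform inputs (Pre_).
-- ===== PORT A =====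
-- A: build the list of skip flags, then empty / all / any checks; the raise branch
-- (mixed flags) is excluded by Pre_ and ported as an unreachable `false`.
def enforce_uniform_skip_py (results : List (Int × Bool × Int)) : Bool :=
  let skips := results.map (fun r => r.2.1)
  if skips = [] then false
  else if skips.all id then true
  else if !(skips.any id) then false
  else false  -- Python raises ValueError here; outside Pre_

-- ===== PORT B =====
-- B helper: the loop over the remaining elements, comparing each flag to `first`;
-- a mismatch raises ValueError in Python (outside Pre_), ported as `false`.
def enforce_uniform_skip_rest (first : Bool) : List (Int × Bool × Int) → Bool
  | [] => first
  | r :: t => if r.2.1 != first then false  -- Python raises ValueError here; outside Pre_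
              else enforce_uniform_skip_rest first t

-- B: empty → False; else take the first flag as reference and scan the rest.
def enforce_uniform_skip_py_alt (results : List (Int × Bool × Int)) : Bool :=
  match results with
  | [] => false
  | x :: t => enforce_uniform_skip_rest x.2.1 t

-- ===== PRECONDITION & SPEC =====
-- Pre_ excludes exactly the inputs with both a true and a false skip flag,
-- on which both A and B raise ValueError.
def Pre_enforce_uniform_skip_py (results : List (Int × Bool × Int)) : Prop :=
  (∀ r ∈ results, r.2.1 = true) ∨ (∀ r ∈ results, r.2.1 = false)
instance (results : List (Int × Bool × Int)) : Decidable (Pre_enforce_uniform_skip_py results) := by unfold Pre_enforce_uniform_skip_py; infer_instance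

def pvWitness_enforce_uniform_skip_py : (List (Int × Bool × Int)) := [(1, true, 2), (3, true, 4)]

def Spec_enforce_uniform_skip_py (results : List (Int × Bool × Int)) (out : Bool) : Prop := out = enforce_uniform_skip_py_alt results
instance (results : List (Int × Bool × Int)) (out : Bool) : Decidable (Spec_enforce_uniform_skip_py results out) := by unfold Spec_enforce_uniform_skip_py; infer_instance

-- ===== CLAIM (what is proved, stated in full; the proofs are below) =====
def Claim_equal_enforce_uniform_skip_py : Prop := ∀ (results : List (Int × Bool × Int)), Dom_enforce_uniform_skip_py results → Pre_enforce_uniform_skip_py results → Spec_enforce_uniform_skip_py results (enforce_uniform_skip_py results)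

-- ===== LEMMAS AND PROOFS =====

-- On a tail whose flags all equal `first`, B's scan returns `first`.
theorem rest_const (first : Bool) (t : List (Int × Bool × Int))
    (h : ∀ r ∈ t, r.2.1 = first) : enforce_uniform_skip_rest first t = first := by
  induction t with
  | nil => rfl
  | cons x s ih =>
    have hx := h x (List.mem_cons_self ..)
    simp only [enforce_uniform_skip_rest, hx, bne_self_eq_false]
    exact ih (fun r hr => h r (List.mem_cons_of_mem x hr))

-- ===== VERDICT (by name: the statement is the Claim_ definition above) =====
theorem enforce_uniform_skip_py_spec : Claim_equal_enforce_uniform_skip_py := by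
  intro results _ hpre
  unfold Spec_enforce_uniform_skip_py enforce_uniform_skip_py enforce_uniform_skip_py_alt
  cases results with
  | nil => simp
  | cons x t =>
    rcases hpre with h | h
    · have hx := h x (List.mem_cons_self ..)
      have hrest : enforce_uniform_skip_rest true t = true :=
        rest_const true t (fun r hr => h r (List.mem_cons_of_mem x hr))
      have ht : (t.all fun r => r.2.1) = true := by
        simp only [List.all_eq_true]; intro r hr; exact h r (List.mem_cons_of_mem x hr)
      simp [hx, hrest, ht]
    · have hx := h x (List.mem_cons_self ..)
      have hrest : enforce_uniform_skip_rest false t = false :=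
        rest_const false t (fun r hr => h r (List.mem_cons_of_mem x hr))
      have h2 : ((x :: t).map (fun r => r.2.1)).any id = false := by
        simp only [List.any_map, List.any_eq_false]; intro r hr; simp [h r hr]
      simp [hrest, hx]
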